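-- pv_equiv track=rewrite | github.com/Ashwin-Pulipati/wordsmith | server/app/services/text_processing.py | build_hashtags
-- ===== SOURCE A (Python) =====
-- from typing import List
--
-- def build_hashtags(keywords: List[str]) -> List[str]:
--     """
--     Turn keywords into simple social-ready hashtags.
--
--     - Removes internal spaces.
--     - Keeps only basic word characters and '#'.
--     - Deduplicates while preserving order.
--     """
--     seen = set()
--     hashtags: List[str] = []
--
--     for kw in keywords:
--         base = "".join(ch for ch in kw if ch.isalnum() or ch == " ")
--         base = base.replace(" ", "")
--         if not base:
--             continue
--         tag = f"#{base}"
--         if tag not in seen: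
--             seen.add(tag)
--             hashtags.append(tag)
--
--     return hashtags
-- ===== SOURCE B (Python) =====
-- from typing import List
--
-- def build_hashtags(keywords: List[str]) -> List[str]:
--     # Pass 1: normalize each keyword to a tag, remembering its position.
--     tagged = []
--     for i, kw in enumerate(keywords):
--         base = ''.join(c for c in kw if c.isalnum())
--         if base:
--             tagged.append(('#' + base, i))
--     # Pass 2: walk back-to-front so the surviving value is the FIRST index.
--     first = {}
--     for tag, i in reversed(tagged):
--         first[tag] = i
--     # Pass 3: order the distinct tags by first-occurrence index.
--     return [tag for tag, _ in sorted(first.items(), key=lambda kv: kv[1])]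
-- ===== Notes on version B (the rewrite author's own statement) =====
-- stated objective: alternative
-- what changed: Replaces A's single fused loop with an on-the-fly seen-set dedup by an index-and-sort algorithm: pair every non-empty normalized tag with its position, build a tag-to-first-index map by overwriting while walking the pairs back-to-front (no membership test anywhere), then sort the map's distinct tags by first-occurrence index.
import Mathlib
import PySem

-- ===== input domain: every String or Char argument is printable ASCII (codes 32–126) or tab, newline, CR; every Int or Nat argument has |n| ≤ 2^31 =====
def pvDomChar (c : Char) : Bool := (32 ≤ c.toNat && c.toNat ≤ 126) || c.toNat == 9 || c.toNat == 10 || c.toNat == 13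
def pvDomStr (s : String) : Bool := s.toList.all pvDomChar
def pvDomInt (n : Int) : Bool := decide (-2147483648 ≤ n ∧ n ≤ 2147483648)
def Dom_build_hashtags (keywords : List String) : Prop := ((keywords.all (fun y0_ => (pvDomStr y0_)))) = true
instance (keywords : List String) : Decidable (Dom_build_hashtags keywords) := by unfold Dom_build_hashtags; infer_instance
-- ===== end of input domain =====

-- B replaces A's fused loop with its on-the-fly seen-set dedup by an index-and-sort algorithm:
-- tag each keyword with its position, overwrite a tag→index map back-to-front (so the first
-- index survives, with no membership test), then sort the distinct tags by that index.
-- Objective: alternative (same task, genuinely different algorithm; not claimed faster).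


-- ===== PORT A =====
-- A's loop body (strings are handled on the List Char side, where PySem's string
-- primitives are exact; the final strings are rebuilt with String.ofList).
def pvStepA (st : PySem.Set (List Char) × List (List Char)) (kw : String) :
    PySem.Set (List Char) × List (List Char) :=
  let base := kw.toList.filter (fun ch => PySem.Chars.isalnum ch || ch == ' ')
  let base := PySem.Chars.replace base [' '] []
  if base.isEmpty then st
  else
    let tag := '#' :: base
    if tag ∉ st.1 then (st.1.add tag, st.2 ++ [tag])
    else st

def build_hashtags (keywords : List String) : List String :=
  ((keywords.foldl pvStepA (PySem.Set.empty, [])).2).map String.ofList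

-- ===== PORT B =====
-- B: (1) pair each keyword's alnum-only tag with its enumerate index, skipping empties;
-- (2) fold the pairs REVERSED into a dict so the surviving value is the FIRST index;
-- (3) sort the dict's items by that index and keep the tags.
def build_hashtags_alt (keywords : List String) : List String :=
  let tagged :=
    (PySem.List.enumerate keywords 0).foldl
      (fun acc p =>
        let base := p.2.toList.filter PySem.Chars.isalnum
        if base.isEmpty then acc else acc ++ [(('#' :: base : List Char), p.1)]) []
  let first : PySem.Dict (List Char) Int :=
    tagged.reverse.foldl (fun d p => d.insert p.1 p.2) PySem.Dict.empty
  (PySem.List.sorted first.items (fun kv => kv.2)).map (fun kv => String.ofList kv.1)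

-- ===== PRECONDITION & SPEC =====
def Spec_build_hashtags (keywords : List String) (out : List String) : Prop := out = build_hashtags_alt keywords
instance (keywords : List String) (out : List String) : Decidable (Spec_build_hashtags keywords out) := by unfold Spec_build_hashtags; infer_instance

-- ===== CLAIM (what is proved, stated in full; the proofs are below) =====
def Claim_equal_build_hashtags : Prop := ∀ (keywords : List String), Dom_build_hashtags keywords → Spec_build_hashtags keywords (build_hashtags keywords)

-- ===== LEMMAS AND PROOFS =====

-- base.replace(" ", "") with a one-char pattern is a character filter
theorem replace_go_single (c : Char) : ∀ (fuel : Nat) (l acc : List Char), l.length ≤ fuel →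
    PySem.Chars.replace.go [c] [] fuel l acc = acc.reverse ++ l.filter (fun x => x ≠ c) := by
  intro fuel
  induction fuel with
  | zero =>
    intro l acc h
    have : l = [] := List.eq_nil_of_length_eq_zero (Nat.le_zero.mp h)
    subst this; simp [PySem.Chars.replace.go]
  | succ n ih =>
    intro l acc h
    cases l with
    | nil => simp [PySem.Chars.replace.go]
    | cons x t =>
      simp only [PySem.Chars.replace.go]
      by_cases hx : x = c
      · subst hx
        have hpre : [x].isPrefixOf (x :: t) = true := by simp [List.isPrefixOf]
        rw [if_pos hpre]
        simp only [List.length_cons, List.length_nil, List.reverse_nil, List.nil_append,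
          List.drop_succ_cons, List.drop_zero]
        rw [ih t acc (by simpa using Nat.le_of_succ_le_succ h)]
        simp
      · have hpre : [c].isPrefixOf (x :: t) = false := by
          simp [List.isPrefixOf]
          exact fun hcx => hx hcx.symm
        rw [if_neg (by simp [hpre])]
        rw [ih t (x :: acc) (by simpa using Nat.le_of_succ_le_succ h)]
        simp [hx]

theorem replace_single (c : Char) (l : List Char) :
    PySem.Chars.replace l [c] [] = l.filter (fun x => x ≠ c) := by
  rw [PySem.Chars.replace]
  simp only [List.isEmpty_cons]
  rw [replace_go_single c l.length l [] (le_refl _)]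
  simp

-- A's two per-keyword passes (keep alnum-or-space, then drop spaces) equal one alnum filter
theorem base_eq (l : List Char) :
    PySem.Chars.replace (l.filter (fun ch => PySem.Chars.isalnum ch || ch == ' ')) [' '] [] =
      l.filter PySem.Chars.isalnum := by
  rw [replace_single, List.filter_filter]
  apply List.filter_congr
  intro x _
  by_cases hx : x = ' '
  · subst hx; decide
  · simp [hx]

-- A's candidate tag list, in keyword order
def pvCand (keywords : List String) : List (List Char) :=
  (keywords.map (fun kw => '#' :: kw.toList.filter PySem.Chars.isalnum)).filter (fun t => t ≠ ['#'])

-- A's fused loop, started in any state whose seen set IS its output list, computes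
-- Set.add-folding over the candidate list.
theorem loopA (ks : List String) : ∀ (s : List (List Char)),
    (ks.foldl pvStepA (s, s)).2 = (pvCand ks).foldl PySem.Set.add s := by
  induction ks with
  | nil => intro s; rfl
  | cons kw ks ih =>
    intro s
    simp only [List.foldl_cons, pvCand, List.map_cons]
    by_cases hb : (kw.toList.filter PySem.Chars.isalnum) = []
    · have hstep : pvStepA (s, s) kw = (s, s) := by
        simp [pvStepA, base_eq, hb]
      rw [hstep, ih s]
      simp [pvCand, hb]
    · have htag : ¬ ('#' :: kw.toList.filter PySem.Chars.isalnum) = ['#'] := by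
        simpa using hb
      rw [List.filter_cons_of_pos (by simpa using htag)]
      by_cases hmem : ('#' :: kw.toList.filter PySem.Chars.isalnum) ∈ s
      · have hstep : pvStepA (s, s) kw = (s, s) := by
          simp [pvStepA, base_eq, hb, hmem]
        have hadd : PySem.Set.add s ('#' :: kw.toList.filter PySem.Chars.isalnum) = s := by
          simp [PySem.Set.add, hmem]
        rw [hstep, ih s, List.foldl_cons, hadd]
        exact rfl
      · have hadd : PySem.Set.add s ('#' :: kw.toList.filter PySem.Chars.isalnum) =
            s ++ ['#' :: kw.toList.filter PySem.Chars.isalnum] := by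
          simp [PySem.Set.add, hmem]
        have hstep : pvStepA (s, s) kw =
            (PySem.Set.add s ('#' :: kw.toList.filter PySem.Chars.isalnum),
             s ++ ['#' :: kw.toList.filter PySem.Chars.isalnum]) := by
          simp [pvStepA, base_eq, hb, hmem]
        rw [hstep, hadd, ih (s ++ ['#' :: kw.toList.filter PySem.Chars.isalnum]),
          List.foldl_cons, hadd]
        exact rfl

-- ---------- B side ----------

-- B's first pass in closed form: the non-'#' tags paired with their enumerate index
def pvTagged (keywords : List String) (s : Int) : List (List Char × Int) :=
  ((PySem.List.enumerate keywords s).filter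
      (fun p => !(p.2.toList.filter PySem.Chars.isalnum).isEmpty)).map
    (fun p => ('#' :: p.2.toList.filter PySem.Chars.isalnum, p.1))

theorem taggedB_eq (ks : List String) (s : Int) :
    (PySem.List.enumerate ks s).foldl
      (fun acc p =>
        let base := p.2.toList.filter PySem.Chars.isalnum
        if base.isEmpty then acc else acc ++ [(('#' :: base : List Char), p.1)]) []
      = pvTagged ks s := by
  have hstep :
      (fun (acc : List (List Char × Int)) (p : Int × String) =>
        let base := p.2.toList.filter PySem.Chars.isalnum
        if base.isEmpty then acc else acc ++ [(('#' :: base : List Char), p.1)]) =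
      (fun acc p =>
        if (!(p.2.toList.filter PySem.Chars.isalnum).isEmpty) = true then
          acc ++ [('#' :: p.2.toList.filter PySem.Chars.isalnum, p.1)] else acc) := by
    funext acc p
    by_cases h : (p.2.toList.filter PySem.Chars.isalnum).isEmpty = true <;> simp [h]
  rw [hstep, PySem.List.foldl_append_if]
  rfl

-- the tags of pvTagged are exactly A's candidate list
theorem map_fst_pvTagged (ks : List String) : ∀ s, (pvTagged ks s).map Prod.fst = pvCand ks := by
  induction ks with
  | nil => intro s; rfl
  | cons kw ks ih =>
    intro s
    simp only [pvTagged, pvCand, PySem.List.enumerate_cons, List.map_cons]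
    by_cases hb : (kw.toList.filter PySem.Chars.isalnum) = []
    · rw [List.filter_cons_of_neg (by simp [hb]), List.filter_cons_of_neg (by simp [hb])]
      exact ih (s + 1)
    · rw [List.filter_cons_of_pos (by simp [hb]), List.filter_cons_of_pos (by simpa using hb),
        List.map_cons]
      exact congrArg _ (ih (s + 1))

-- the indices of pvTagged are strictly increasing
theorem pairwise_pvTagged (ks : List String) (s : Int) :
    (pvTagged ks s).Pairwise (fun a b => a.2 < b.2) := by
  apply List.Pairwise.map
  · intro a b h
    exact h
  · exact (PySem.List.pairwise_lt_enumerate ks s).filter _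

-- B's dict, built from the reversed pair list
def pvD (l : List (List Char × Int)) : PySem.Dict (List Char) Int :=
  l.reverse.foldl (fun d p => d.insert p.1 p.2) PySem.Dict.empty

theorem pvD_cons (x : List Char × Int) (l : List (List Char × Int)) :
    pvD (x :: l) = (pvD l).insert x.1 x.2 := by
  simp [pvD, List.foldl_append]

theorem pvD_keys_nodup (l : List (List Char × Int)) : (pvD l).keys.Nodup :=
  PySem.Dict.nodup_keys_foldl_insert_key l.reverse Prod.fst (fun _ p => p.2) _
    PySem.Dict.nodup_keys_empty

theorem pvD_get? (l : List (List Char × Int)) (t : List Char) :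
    (pvD l).get? t = (l.find? (fun p => p.1 == t)).map Prod.snd := by
  induction l with
  | nil => simp [pvD]
  | cons x l ih =>
    rw [pvD_cons, PySem.Dict.get?_insert]
    by_cases h : t = x.1
    · simp [h]
    · have hx : (x.1 == t) = false := by simpa using fun hc => h hc.symm
      simp [h, hx, ih]

-- first-occurrence pairs of a keyed list, by recursively discarding the head's duplicates
-- (structural on a length fuel; pvFirsts_cons is its recurrence)
def pvFirstsGo : Nat → List (List Char × Int) → List (List Char × Int)
  | _, [] => []
  | 0, _ :: _ => []
  | n + 1, x :: l => x :: pvFirstsGo n (l.filter (fun p => p.1 ≠ x.1))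

def pvFirsts (l : List (List Char × Int)) : List (List Char × Int) := pvFirstsGo l.length l

theorem pvFirstsGo_congr : ∀ (n m : Nat) (l : List (List Char × Int)),
    l.length ≤ n → l.length ≤ m → pvFirstsGo n l = pvFirstsGo m l := by
  intro n
  induction n with
  | zero =>
    intro m l h _
    have : l = [] := List.eq_nil_of_length_eq_zero (Nat.le_zero.mp h)
    subst this; cases m <;> rfl
  | succ n ih =>
    intro m l hn hm
    cases l with
    | nil => cases m <;> rfl
    | cons x l =>
      cases m with
      | zero => simp at hm
      | succ m =>
        simp only [pvFirstsGo]
        rw [ih m _ (le_trans (List.length_filter_le _ _) (Nat.le_of_succ_le_succ hn))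
          (le_trans (List.length_filter_le _ _) (Nat.le_of_succ_le_succ hm))]

theorem pvFirsts_cons (x : List Char × Int) (l : List (List Char × Int)) :
    pvFirsts (x :: l) = x :: pvFirsts (l.filter (fun p => p.1 ≠ x.1)) := by
  show pvFirstsGo (l.length + 1) (x :: l) = _
  simp only [pvFirstsGo]
  rw [pvFirstsGo_congr l.length _ _ (List.length_filter_le _ _) le_rfl]
  rfl

theorem mem_of_mem_pvFirsts_aux : ∀ (n : Nat) (l : List (List Char × Int)), l.length ≤ n →
    ∀ (p : List Char × Int), p ∈ pvFirsts l → p ∈ l := by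
  intro n
  induction n with
  | zero =>
    intro l h
    have : l = [] := List.eq_nil_of_length_eq_zero (Nat.le_zero.mp h)
    subst this; intro p hp; simp [pvFirsts, pvFirstsGo] at hp
  | succ n ih =>
    intro l hl p hp
    cases l with
    | nil => simp [pvFirsts, pvFirstsGo] at hp
    | cons x l =>
      rw [pvFirsts_cons] at hp
      rcases List.mem_cons.mp hp with h | h
      · simp [h]
      · exact List.mem_cons_of_mem _ (List.mem_of_mem_filter
          (ih _ (le_trans (List.length_filter_le _ _) (Nat.le_of_succ_le_succ hl)) p h))

theorem mem_of_mem_pvFirsts (l : List (List Char × Int)) (p : List Char × Int) :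
    p ∈ pvFirsts l → p ∈ l :=
  mem_of_mem_pvFirsts_aux l.length l le_rfl p

theorem find?_filter_ne (a t : List Char) (hne : t ≠ a) : ∀ (l : List (List Char × Int)),
    (l.filter (fun p => p.1 ≠ a)).find? (fun p => p.1 == t) = l.find? (fun p => p.1 == t) := by
  intro l
  induction l with
  | nil => rfl
  | cons x l ih =>
    by_cases hx : x.1 = a
    · rw [List.filter_cons_of_neg (by simp [hx])]
      have hxt : (x.1 == t) = false := by simpa [hx] using fun hc => hne hc.symm
      rw [List.find?_cons, hxt, ih]
    · rw [List.filter_cons_of_pos (by simpa using hx)]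
      by_cases h : (x.1 == t) = true
      · simp only [List.find?_cons, h]
      · have hfalse : (x.1 == t) = false := by simpa using h
        simp only [List.find?_cons, hfalse]
        exact ih

theorem mem_pvFirsts_iff_aux : ∀ (n : Nat) (l : List (List Char × Int)), l.length ≤ n →
    ∀ (t : List Char) (v : Int),
    ((t, v) ∈ pvFirsts l ↔ l.find? (fun p => p.1 == t) = some (t, v)) := by
  intro n
  induction n with
  | zero =>
    intro l h
    have : l = [] := List.eq_nil_of_length_eq_zero (Nat.le_zero.mp h)
    subst this; intro t v; simp [pvFirsts, pvFirstsGo]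
  | succ n ih =>
    intro l hl t v
    cases l with
    | nil => simp [pvFirsts, pvFirstsGo]
    | cons x l =>
      rw [pvFirsts_cons]
      have hfil : (l.filter (fun p => p.1 ≠ x.1)).length ≤ n :=
        le_trans (List.length_filter_le _ _) (Nat.le_of_succ_le_succ hl)
      by_cases h : t = x.1
      · have hnot : (t, v) ∉ pvFirsts (l.filter (fun p => p.1 ≠ x.1)) := by
          intro hm
          have := List.of_mem_filter (mem_of_mem_pvFirsts _ _ hm)
          simp [h] at this
        constructor
        · intro hm
          rcases List.mem_cons.mp hm with he | hm
          · rw [← he]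
            simp
          · exact absurd hm hnot
        · intro hf
          have hc : (x.1 == t) = true := by simp [h]
          simp only [List.find?_cons, hc] at hf
          simp at hf
          simp [hf]
      · have hx : (x.1 == t) = false := by simpa using fun hc => h hc.symm
        simp only [List.find?_cons, hx]
        rw [← find?_filter_ne x.1 t h l, ← ih _ hfil t v]
        constructor
        · intro hm
          rcases List.mem_cons.mp hm with he | hm
          · exact absurd (show t = x.1 by simpa using congrArg Prod.fst he) h
          · exact hm
        · exact List.mem_cons_of_mem _

theorem mem_pvFirsts_iff (l : List (List Char × Int)) (t : List Char) (v : Int) :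
    (t, v) ∈ pvFirsts l ↔ l.find? (fun p => p.1 == t) = some (t, v) :=
  mem_pvFirsts_iff_aux l.length l le_rfl t v

theorem nodup_map_fst_pvFirsts_aux : ∀ (n : Nat) (l : List (List Char × Int)), l.length ≤ n →
    ((pvFirsts l).map Prod.fst).Nodup := by
  intro n
  induction n with
  | zero =>
    intro l h
    have : l = [] := List.eq_nil_of_length_eq_zero (Nat.le_zero.mp h)
    subst this; simp [pvFirsts, pvFirstsGo]
  | succ n ih =>
    intro l hl
    cases l with
    | nil => simp [pvFirsts, pvFirstsGo]
    | cons x l =>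
      rw [pvFirsts_cons, List.map_cons]
      refine List.nodup_cons.mpr
        ⟨?_, ih _ (le_trans (List.length_filter_le _ _) (Nat.le_of_succ_le_succ hl))⟩
      intro hm
      rcases List.mem_map.mp hm with ⟨p, hp, hfst⟩
      have := List.of_mem_filter (mem_of_mem_pvFirsts _ _ hp)
      simp [hfst] at this

theorem nodup_map_fst_pvFirsts (l : List (List Char × Int)) :
    ((pvFirsts l).map Prod.fst).Nodup :=
  nodup_map_fst_pvFirsts_aux l.length l le_rfl

theorem pairwise_pvFirsts_aux : ∀ (n : Nat) (l : List (List Char × Int)), l.length ≤ n →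
    l.Pairwise (fun a b => a.2 < b.2) → (pvFirsts l).Pairwise (fun a b => a.2 < b.2) := by
  intro n
  induction n with
  | zero =>
    intro l h
    have : l = [] := List.eq_nil_of_length_eq_zero (Nat.le_zero.mp h)
    subst this; intro _; simp [pvFirsts, pvFirstsGo]
  | succ n ih =>
    intro l hl hp
    cases l with
    | nil => simp [pvFirsts, pvFirstsGo]
    | cons x l =>
      rcases List.pairwise_cons.mp hp with ⟨hhead, htail⟩
      rw [pvFirsts_cons]
      refine List.pairwise_cons.mpr
        ⟨?_, ih _ (le_trans (List.length_filter_le _ _) (Nat.le_of_succ_le_succ hl))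
          (htail.filter _)⟩
      intro p hm
      exact hhead p (List.mem_of_mem_filter (mem_of_mem_pvFirsts _ _ hm))

theorem pairwise_pvFirsts (l : List (List Char × Int))
    (h : l.Pairwise (fun a b => a.2 < b.2)) :
    (pvFirsts l).Pairwise (fun a b => a.2 < b.2) :=
  pairwise_pvFirsts_aux l.length l le_rfl h

-- the dict's items are a permutation of the first-occurrence pairs
theorem perm_pvFirsts_items (l : List (List Char × Int)) :
    (pvFirsts l).Perm (pvD l).items := by
  have hnodD : (pvD l).items.Nodup := by
    have := pvD_keys_nodup l
    rw [show (pvD l).keys = (pvD l).items.map Prod.fst from rfl] at this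
    exact this.of_map
  have hnodF : (pvFirsts l).Nodup := (nodup_map_fst_pvFirsts l).of_map
  refine (List.perm_ext_iff_of_nodup hnodF hnodD).mpr ?_
  intro p
  obtain ⟨t, v⟩ := p
  rw [mem_pvFirsts_iff l t v,
    ← PySem.Dict.get?_eq_some_iff_mem_items _ t v (pvD_keys_nodup l), pvD_get?]
  -- both memberships say: the first pair of l keyed t is exactly (t, v)
  constructor
  · intro hf; rw [hf]; rfl
  · intro hf
    cases hq : l.find? (fun p' => p'.1 == t) with
    | none => rw [hq] at hf; simp at hf
    | some q =>
      have hkey : q.1 = t := by simpa using List.find?_some hq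
      rw [hq] at hf
      simp at hf
      cases q
      simp at hkey hf
      simp [hkey, hf]

-- Set.add-folding ignores elements already present
theorem foldl_add_filter (a : List Char) : ∀ (m : List (List Char)) (acc : PySem.Set (List Char)),
    a ∈ acc → m.foldl PySem.Set.add acc = (m.filter (fun x => x ≠ a)).foldl PySem.Set.add acc := by
  intro m
  induction m with
  | nil => intro acc _; rfl
  | cons b m ih =>
    intro acc ha
    by_cases hb : b = a
    · subst hb
      rw [List.filter_cons_of_neg (by simp), List.foldl_cons,
        show PySem.Set.add acc b = acc from by simp [PySem.Set.add, ha]]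
      exact ih acc ha
    · rw [List.filter_cons_of_pos (by simpa using hb), List.foldl_cons, List.foldl_cons]
      refine ih _ ?_
      by_cases hm : b ∈ acc <;> simp [PySem.Set.add, hm, ha]

-- an accumulator prefix no later element touches passes through Set.add-folding
theorem foldl_add_prefix (a : List Char) : ∀ (m : List (List Char)) (acc : List (List Char)),
    (∀ x ∈ m, x ≠ a) →
    m.foldl PySem.Set.add (a :: acc) = a :: m.foldl PySem.Set.add acc := by
  intro m
  induction m with
  | nil => intro acc _; rfl
  | cons b m ih =>
    intro acc hne
    have hb : b ≠ a := hne b (by simp)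
    rw [List.foldl_cons, List.foldl_cons,
      show PySem.Set.add (a :: acc) b = a :: PySem.Set.add acc b from by
        by_cases hm : b ∈ acc <;> simp [PySem.Set.add, hm, hb]]
    exact ih _ (fun x hx => hne x (by simp [hx]))

-- ordered dedup peels its head and discards the head's later duplicates
theorem dedup_cons_filter (a : List Char) (m : List (List Char)) :
    PySem.List.dedup (a :: m) = a :: PySem.List.dedup (m.filter (fun x => x ≠ a)) := by
  have h1 : PySem.List.dedup (a :: m) = m.foldl PySem.Set.add [a] := rfl
  rw [h1, foldl_add_filter a m [a] (by simp),
    foldl_add_prefix a _ [] (fun x hx => by simpa using (List.of_mem_filter hx))]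
  rfl

-- keys of the first-occurrence pairs = ordered dedup of all keys
theorem map_fst_pvFirsts_eq_dedup_aux : ∀ (n : Nat) (l : List (List Char × Int)), l.length ≤ n →
    (pvFirsts l).map Prod.fst = PySem.List.dedup (l.map Prod.fst) := by
  intro n
  induction n with
  | zero =>
    intro l h
    have : l = [] := List.eq_nil_of_length_eq_zero (Nat.le_zero.mp h)
    subst this; rfl
  | succ n ih =>
    intro l hl
    cases l with
    | nil => rfl
    | cons x l =>
      rw [pvFirsts_cons, List.map_cons, List.map_cons, dedup_cons_filter,
        ih _ (le_trans (List.length_filter_le _ _) (Nat.le_of_succ_le_succ hl))]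
      have h2 : (l.filter (fun p => p.1 ≠ x.1)).map Prod.fst =
          (l.map Prod.fst).filter (fun t => t ≠ x.1) := by
        rw [List.filter_map]
        rfl
      rw [h2]

theorem map_fst_pvFirsts_eq_dedup (l : List (List Char × Int)) :
    (pvFirsts l).map Prod.fst = PySem.List.dedup (l.map Prod.fst) :=
  map_fst_pvFirsts_eq_dedup_aux l.length l le_rfl

-- ===== VERDICT (by name: the statement is the Claim_ definition above) =====
theorem build_hashtags_spec : Claim_equal_build_hashtags := by
  intro keywords _
  unfold Spec_build_hashtags build_hashtags build_hashtags_alt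
  rw [show (PySem.Set.empty : PySem.Set (List Char)) = ([] : List (List Char)) from rfl]
  rw [loopA keywords [], taggedB_eq keywords 0]
  have hsort : PySem.List.sorted (pvD (pvTagged keywords 0)).items (fun kv => kv.2) =
      pvFirsts (pvTagged keywords 0) :=
    PySem.List.sorted_eq_of_perm_of_pairwise_lt _ _ _
      (perm_pvFirsts_items _)
      (pairwise_pvFirsts _ (pairwise_pvTagged keywords 0))
  show (List.foldl PySem.Set.add [] (pvCand keywords)).map String.ofList =
    (PySem.List.sorted (pvD (pvTagged keywords 0)).items (fun kv => kv.2)).map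
      (fun kv => String.ofList kv.1)
  rw [hsort]
  rw [show ((pvFirsts (pvTagged keywords 0)).map fun kv => String.ofList kv.1) =
      ((pvFirsts (pvTagged keywords 0)).map Prod.fst).map String.ofList from by
    rw [List.map_map]; rfl]
  rw [map_fst_pvFirsts_eq_dedup, map_fst_pvTagged keywords 0]
  rfl
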